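-- pv_equiv track=rewrite | github.com/YAHS-code/TXT_SEARCH_ENGIN.PY | modul3yahsaint/search_core.py | recherche_multiple
-- ===== SOURCE A (Python) =====
-- def recherche_multiple(index, mots, mode='OU'):
--     mots = [mot.lower() for mot in mots]
--     resultats = []
--
--     if mode == 'OU':
--         for mot in mots:
--             resultats.extend(index.get(mot, []))
--
--     elif mode == 'ET':
--         # Récupérer les ensembles de fichiers pour chaque mot
--         fichiers_par_mot = [set(entry['fichier'] for entry in index.get(mot, [])) for mot in mots]
--         if fichiers_par_mot:
--             # Intersecter les fichiers pour trouver ceux contenant tous les mots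
--             fichiers_communs = set.intersection(*fichiers_par_mot)
--             # Récupérer toutes les occurrences dans ces fichiers
--             for mot in mots:
--                 for occ in index.get(mot, []):
--                     if occ['fichier'] in fichiers_communs:
--                         resultats.append(occ)
--
--     return resultats
-- ===== SOURCE B (Python) =====
-- def recherche_multiple(index, mots, mode='OU'):
--     mots = [mot.lower() for mot in mots]
--     if mode == 'OU':
--         return [occ for mot in mots for occ in index.get(mot, [])]
--     if mode == 'ET' and mots:
--         return [occ for mot in mots for occ in index.get(mot, [])
--                 if all(any(e['fichier'] == occ['fichier'] for e in index.get(w, []))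
--                        for w in mots)]
--     return []
-- ===== Notes on version B (the rewrite author's own statement) =====
-- stated objective: simpler
-- what changed: ET mode drops the per-word file sets and set.intersection entirely: each occurrence is kept by a direct all/any quantifier check (every query word has some posting with this occurrence's file), and both result loops become flat comprehensions instead of extend/append accumulator loops.
import Mathlib
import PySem

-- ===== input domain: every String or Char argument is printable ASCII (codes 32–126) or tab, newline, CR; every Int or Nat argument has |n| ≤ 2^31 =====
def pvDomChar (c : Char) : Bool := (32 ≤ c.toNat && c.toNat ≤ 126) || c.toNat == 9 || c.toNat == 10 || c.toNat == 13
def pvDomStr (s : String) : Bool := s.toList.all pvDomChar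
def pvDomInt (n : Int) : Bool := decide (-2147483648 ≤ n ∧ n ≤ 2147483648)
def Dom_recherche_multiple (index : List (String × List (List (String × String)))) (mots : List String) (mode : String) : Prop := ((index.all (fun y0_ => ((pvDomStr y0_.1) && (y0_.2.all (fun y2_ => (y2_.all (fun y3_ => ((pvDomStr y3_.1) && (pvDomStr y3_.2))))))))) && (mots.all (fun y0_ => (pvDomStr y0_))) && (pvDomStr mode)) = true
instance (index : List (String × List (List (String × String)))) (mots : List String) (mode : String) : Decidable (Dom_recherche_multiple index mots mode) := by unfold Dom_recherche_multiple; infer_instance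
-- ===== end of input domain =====

-- B (simpler): ET mode has no file sets and no set.intersection — each occurrence is kept by a
-- direct all/any check that every query word has some posting with that occurrence's file.

-- ===== PORT A =====
-- index.get(mot, []) on the dict argument (dict(pairs): later duplicate keys overwrite)
def pvGetIndex (index : List (String × List (List (String × String)))) (mot : String) : List (List (String × String)) :=
  (PySem.Dict.ofList index).getD mot []

-- occ['fichier']: total form of the KeyError-raising lookup; Pre_ excludes the 'none' case
def pvFichier (occ : List (String × String)) : String :=
  ((PySem.Dict.ofList occ).get? "fichier").getD ""

-- set(entry['fichier'] for entry in index.get(mot, []))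
def pvFiles (index : List (String × List (List (String × String)))) (mot : String) : PySem.Set String :=
  PySem.Set.ofList ((pvGetIndex index mot).map pvFichier)

def recherche_multiple (index : List (String × List (List (String × String)))) (mots : List String) (mode : String) : List (List (String × String)) :=
  let motsL := mots.map PySem.Str.lower
  let resultats : List (List (String × String)) := []
  if mode == "OU" then
    motsL.foldl (fun res mot => res ++ pvGetIndex index mot) resultats
  else if mode == "ET" then
    let fichiers_par_mot := motsL.map (fun mot => pvFiles index mot)
    match fichiers_par_mot with
    | [] => resultats
    | s :: rest =>
      let fichiers_communs := rest.foldl PySem.Set.inter s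
      motsL.foldl (fun res mot =>
        (pvGetIndex index mot).foldl (fun res occ =>
          if fichiers_communs.contains (pvFichier occ) then res ++ [occ] else res) res) resultats
  else resultats

-- ===== PORT B =====
def recherche_multiple_alt (index : List (String × List (List (String × String)))) (mots : List String) (mode : String) : List (List (String × String)) :=
  let motsL := mots.map PySem.Str.lower
  if mode == "OU" then
    motsL.flatMap (fun mot => pvGetIndex index mot)
  else if mode == "ET" && !motsL.isEmpty then
    motsL.flatMap (fun mot =>
      (pvGetIndex index mot).filter (fun occ =>
        motsL.all (fun w => (pvGetIndex index w).any (fun e => pvFichier e == pvFichier occ))))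
  else []

-- ===== PRECONDITION & SPEC =====
-- Pre_ excludes exactly the KeyError inputs: in ET mode every occurrence dict reached by the
-- query must carry the key 'fichier' (Python A raises KeyError on entry['fichier'] otherwise).
def Pre_recherche_multiple (index : List (String × List (List (String × String)))) (mots : List String) (mode : String) : Prop :=
  mode = "ET" → ∀ mot ∈ mots, ∀ occ ∈ pvGetIndex index (PySem.Str.lower mot),
    (PySem.Dict.ofList occ).contains "fichier" = true
instance (index : List (String × List (List (String × String)))) (mots : List String) (mode : String) : Decidable (Pre_recherche_multiple index mots mode) := by unfold Pre_recherche_multiple; infer_instance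

def pvWitness_recherche_multiple : (List (String × List (List (String × String)))) × List String × String :=
  ([("chat", [[("fichier", "f1"), ("pos", "3")], [("fichier", "f2")]]), ("chien", [[("fichier", "f1")]])],
   ["Chat", "CHIEN"], "ET")

def Spec_recherche_multiple (index : List (String × List (List (String × String)))) (mots : List String) (mode : String) (out : List (List (String × String))) : Prop := out = recherche_multiple_alt index mots mode
instance (index : List (String × List (List (String × String)))) (mots : List String) (mode : String) (out : List (List (String × String))) : Decidable (Spec_recherche_multiple index mots mode out) := by unfold Spec_recherche_multiple; infer_instance

-- ===== CLAIM (what is proved, stated in full; the proofs are below) =====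
def Claim_equal_recherche_multiple : Prop := ∀ (index : List (String × List (List (String × String)))) (mots : List String) (mode : String), Dom_recherche_multiple index mots mode → Pre_recherche_multiple index mots mode → Spec_recherche_multiple index mots mode (recherche_multiple index mots mode)

-- ===== LEMMAS AND PROOFS =====

-- membership in the A-side folded intersection
lemma mem_foldl_inter (rest : List (PySem.Set String)) (s : PySem.Set String) (f : String) :
    f ∈ rest.foldl PySem.Set.inter s ↔ f ∈ s ∧ ∀ t ∈ rest, f ∈ t := by
  induction rest generalizing s with
  | nil => simp
  | cons t rest ih =>
    simp only [List.foldl_cons, ih, PySem.Set.mem_inter, List.mem_cons]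
    constructor
    · rintro ⟨⟨hs, ht⟩, h⟩
      exact ⟨hs, fun u hu => hu.elim (fun e => e ▸ ht) (h u)⟩
    · rintro ⟨hs, h⟩
      exact ⟨⟨hs, h t (Or.inl rfl)⟩, fun u hu => h u (Or.inr hu)⟩

-- f lies in a word's file SET iff some posting of that word carries it (B's inner any-scan)
lemma mem_files_iff (index : List (String × List (List (String × String)))) (w f : String) :
    f ∈ pvFiles index w ↔ ((pvGetIndex index w).any (fun e => pvFichier e == f)) = true := by
  rw [pvFiles, PySem.Set.mem_ofList, List.any_eq_true]
  constructor
  · rintro h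
    rcases List.mem_map.mp h with ⟨e, he, rfl⟩
    exact ⟨e, he, by simp⟩
  · rintro ⟨e, he, hf⟩
    exact List.mem_map.mpr ⟨e, he, by simpa using hf⟩

-- A's membership test in the folded intersection = B's all/any quantifier check
lemma contains_eq (index : List (String × List (List (String × String))))
    (m : String) (rest : List String) (f : String) :
    ((rest.map (fun mot => pvFiles index mot)).foldl PySem.Set.inter (pvFiles index m)).contains f
      = (m :: rest).all (fun w => (pvGetIndex index w).any (fun e => pvFichier e == f)) := by
  rw [Bool.eq_iff_iff, PySem.Set.contains_iff, mem_foldl_inter, List.all_eq_true]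
  constructor
  · rintro ⟨hm, h⟩ w hw
    rcases List.mem_cons.mp hw with h' | h'
    · exact (mem_files_iff index w f).mp (h' ▸ hm)
    · exact (mem_files_iff index w f).mp (h _ (List.mem_map_of_mem h'))
  · intro h
    refine ⟨(mem_files_iff index m f).mpr (h m List.mem_cons_self), ?_⟩
    rintro t ht
    rcases List.mem_map.mp ht with ⟨mot, hmot, rfl⟩
    exact (mem_files_iff index mot f).mpr (h mot (List.mem_cons_of_mem _ hmot))

-- ===== VERDICT (by name: the statement is the Claim_ definition above) =====
theorem recherche_multiple_spec : Claim_equal_recherche_multiple := by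
  intro index mots mode _ _
  unfold Spec_recherche_multiple recherche_multiple recherche_multiple_alt
  by_cases hOU : mode == "OU"
  · simp only [hOU, if_pos]
    rw [PySem.List.foldl_append_eq_flatMap]
    simp
  · simp only [hOU, Bool.false_eq_true, if_false]
    by_cases hET : mode == "ET"
    · cases hmots : mots.map PySem.Str.lower with
      | nil =>
        simp [hET]
      | cons m rest =>
        simp only [hET, Bool.true_and, List.map_cons, List.isEmpty_cons, Bool.not_false,
          if_pos]
        have hcong : ∀ mot : String,
            (pvGetIndex index mot).foldl (fun res occ =>
              if (((rest.map (fun mot => pvFiles index mot)).foldl PySem.Set.inter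
                  (pvFiles index m)).contains (pvFichier occ)) then res ++ [occ] else res)
              = fun res => res ++ ((pvGetIndex index mot).filter (fun occ =>
                  ((rest.map (fun mot => pvFiles index mot)).foldl PySem.Set.inter
                    (pvFiles index m)).contains (pvFichier occ))) := by
          intro mot
          funext res
          have := PySem.List.foldl_append_if
            (fun occ => ((rest.map (fun mot => pvFiles index mot)).foldl PySem.Set.inter
              (pvFiles index m)).contains (pvFichier occ))
            (fun occ => occ) (pvGetIndex index mot) res
          simpa using this
        have hbody : (fun (res : List (List (String × String))) (mot : String) =>
            (pvGetIndex index mot).foldl (fun res occ =>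
              if (((rest.map (fun mot => pvFiles index mot)).foldl PySem.Set.inter
                  (pvFiles index m)).contains (pvFichier occ)) then res ++ [occ] else res) res)
            = fun res mot => res ++ ((pvGetIndex index mot).filter (fun occ =>
                ((rest.map (fun mot => pvFiles index mot)).foldl PySem.Set.inter
                  (pvFiles index m)).contains (pvFichier occ))) :=
          funext fun res => funext fun mot => congrFun (hcong mot) res
        rw [hbody, PySem.List.foldl_append_eq_flatMap]
        simp only [List.nil_append, contains_eq index m rest]
    · simp [hET]
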